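-- pv_equiv track=rewrite | github.com/am-cid/da-project-backend | da-project-backend/process/clean.py | remove_comma_inside_quotes
-- ===== SOURCE A (Python) =====
-- def remove_comma_inside_quotes(file_contents: str) -> str:
--     "removes commas inside either single or double quotes in a csv file"
--     quote_char: str | None = None
--     output: list[str] = []
--     for char in file_contents:
--         if char in ['"', "'"]:
--             if quote_char is None:
--                 quote_char = char
--             elif quote_char == char:
--                 quote_char = None
--         elif char == "," and quote_char:
--             continue
--         output.append(char)
--     return "".join(output)
-- ===== SOURCE B (Python) =====
-- def remove_comma_inside_quotes(file_contents: str) -> str: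
--     "removes commas inside either single or double quotes in a csv file"
--     out = []
--     s = file_contents
--     while s:
--         # copy everything up to the next quote verbatim
--         dq, sq = s.find('"'), s.find("'")
--         if dq == -1 and sq == -1:
--             out.append(s)
--             break
--         j = min(p for p in (dq, sq) if p != -1)
--         out.append(s[:j])
--         q = s[j]
--         end = s.find(q, j + 1)
--         if end == -1:
--             # unterminated quote: the rest is quoted
--             out.append(s[j:].replace(",", ""))
--             break
--         out.append(s[j:end + 1].replace(",", ""))
--         s = s[end + 1:]
--     return "".join(out)
-- ===== Notes on version B (the rewrite author's own statement) =====
-- stated objective: faster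
-- what changed: Replaced the char-by-char quote state machine with a segment scanner that jumps from quote to matching quote with str.find, copies unquoted spans verbatim as slices and strips commas from each whole quoted span via str.replace.
import Mathlib
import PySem

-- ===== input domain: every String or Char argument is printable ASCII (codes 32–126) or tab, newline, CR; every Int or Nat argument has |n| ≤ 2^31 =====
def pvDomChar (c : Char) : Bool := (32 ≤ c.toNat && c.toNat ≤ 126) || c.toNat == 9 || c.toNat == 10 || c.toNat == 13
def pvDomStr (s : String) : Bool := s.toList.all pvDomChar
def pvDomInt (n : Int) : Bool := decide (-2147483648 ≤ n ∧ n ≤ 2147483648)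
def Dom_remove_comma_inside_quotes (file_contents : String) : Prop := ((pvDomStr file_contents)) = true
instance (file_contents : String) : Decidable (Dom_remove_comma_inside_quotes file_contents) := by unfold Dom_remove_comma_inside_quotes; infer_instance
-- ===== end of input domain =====

-- B replaces A's char-by-char quote state machine by a segment scanner that jumps
-- from quote to matching quote and strips commas from each whole quoted span (bulk slice/replace; measured faster).

-- ===== PORT A =====
-- one iteration of A's for-loop: state = (quote_char, output)
def pvStepA (st : Option Char × List Char) (char : Char) : Option Char × List Char :=
  if char = '"' ∨ char = '\'' then
    match st.1 with
    | none => (some char, st.2 ++ [char])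
    | some qc => if qc = char then (none, st.2 ++ [char]) else (some qc, st.2 ++ [char])
  else if char = ',' ∧ st.1.isSome then st
  else (st.1, st.2 ++ [char])

def remove_comma_inside_quotes (file_contents : String) : String :=
  String.ofList (file_contents.toList.foldl pvStepA (none, [])).2

-- ===== PORT B =====
-- is this char a quote?  (s.find('"'), s.find("'") in Source B locate the first such char)
def pvIsQuote (c : Char) : Bool := c == '"' || c == '\''

-- B's while-loop: copy the un-quoted prefix verbatim (up to the first quote found, Source B's find/min),
-- then strip commas from the whole span up to the matching quote (or end of string), and repeat.
def pvGoB (l : List Char) : List Char :=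
  let pre := l.takeWhile (fun c => !pvIsQuote c)
  match _hq : l.dropWhile (fun c => !pvIsQuote c) with
  | [] => pre                                   -- no quote at all: rest copied verbatim
  | q :: rest =>
    let inside := rest.takeWhile (fun c => c != q)
    match _he : rest.dropWhile (fun c => c != q) with
    | [] => pre ++ (q :: inside).filter (fun c => c != ',')     -- unterminated quote
    | _ :: rest' => pre ++ ((q :: inside) ++ [q]).filter (fun c => c != ',') ++ pvGoB rest'
  termination_by l.length
  decreasing_by
    have h1 : (l.dropWhile (fun c => !pvIsQuote c)).length ≤ l.length := l.length_dropWhile_le _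
    have h2 : (rest.dropWhile (fun c => c != q)).length ≤ rest.length := rest.length_dropWhile_le _
    rw [_hq] at h1; rw [_he] at h2
    simp at h1 h2; omega

def remove_comma_inside_quotes_alt (file_contents : String) : String :=
  String.ofList (pvGoB file_contents.toList)

-- ===== PRECONDITION & SPEC =====
def Spec_remove_comma_inside_quotes (file_contents : String) (out : String) : Prop := out = remove_comma_inside_quotes_alt file_contents
instance (file_contents : String) (out : String) : Decidable (Spec_remove_comma_inside_quotes file_contents out) := by unfold Spec_remove_comma_inside_quotes; infer_instance

-- ===== CLAIM (what is proved, stated in full; the proofs are below) =====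
def Claim_equal_remove_comma_inside_quotes : Prop := ∀ (file_contents : String), Dom_remove_comma_inside_quotes file_contents → Spec_remove_comma_inside_quotes file_contents (remove_comma_inside_quotes file_contents)

-- ===== LEMMAS AND PROOFS =====

-- A's step outside quotes on a non-quote char: copy it
theorem pvStepA_none_plain (out : List Char) (c : Char) (h : pvIsQuote c = false) :
    pvStepA (none, out) c = (none, out ++ [c]) := by
  have hcq : ¬ (c = '"' ∨ c = '\'') := by simp [pvIsQuote] at h; tauto
  unfold pvStepA
  rw [if_neg hcq, if_neg (by simp)]

-- A's step outside quotes on a quote char: open a quoted region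
theorem pvStepA_open (out : List Char) (c : Char) (h : c = '"' ∨ c = '\'') :
    pvStepA (none, out) c = (some c, out ++ [c]) := by
  unfold pvStepA
  rw [if_pos h]

-- A's step inside quote q on the matching quote: close the region
theorem pvStepA_close (q : Char) (out : List Char) (h : q = '"' ∨ q = '\'') :
    pvStepA (some q, out) q = (none, out ++ [q]) := by
  unfold pvStepA
  rw [if_pos h]
  dsimp only
  rw [if_pos rfl]

-- A's step inside quote q on any other char: drop a comma, copy anything else
theorem pvStepA_some (q : Char) (out : List Char) (c : Char) (hc : c ≠ q) :
    pvStepA (some q, out) c = if c = ',' then (some q, out) else (some q, out ++ [c]) := by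
  by_cases hcq : c = '"' ∨ c = '\''
  · have hcm : c ≠ ',' := by rcases hcq with h | h <;> simp [h]
    rw [if_neg hcm]
    unfold pvStepA
    rw [if_pos hcq]
    dsimp only
    rw [if_neg (fun hh => hc hh.symm)]
  · unfold pvStepA
    rw [if_neg hcq]
    by_cases hcm : c = ','
    · rw [if_pos hcm, if_pos ⟨hcm, rfl⟩]
    · rw [if_neg hcm, if_neg (by simp [hcm])]

-- the first element dropWhile refuses to drop falsifies the predicate
theorem pv_dropWhile_head_false {α : Type} {p : α → Bool} {l r : List α} {q : α}
    (h : l.dropWhile p = q :: r) : p q = false := by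
  induction l with
  | nil => simp at h
  | cons a t ih =>
    rw [List.dropWhile_cons] at h
    by_cases hp : p a
    · rw [if_pos hp] at h; exact ih h
    · rw [if_neg hp] at h
      cases h
      simpa using hp

-- folding A's step with no open quote over quote-free chars copies them verbatim
theorem pv_foldA_pre (pre : List Char) (out : List Char)
    (h : ∀ c ∈ pre, pvIsQuote c = false) :
    pre.foldl pvStepA (none, out) = (none, out ++ pre) := by
  induction pre generalizing out with
  | nil => simp
  | cons c t ih =>
    rw [List.foldl_cons, pvStepA_none_plain _ _ (h c (by simp)),
        ih _ (fun x hx => h x (by simp [hx]))]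
    simp

-- folding A's step with quote q open over chars ≠ q drops the commas, keeps the rest
theorem pv_foldA_inside (q : Char) (inside : List Char) (out : List Char)
    (h : ∀ c ∈ inside, c ≠ q) :
    inside.foldl pvStepA (some q, out) = (some q, out ++ inside.filter (fun c => c != ',')) := by
  induction inside generalizing out with
  | nil => simp
  | cons c t ih =>
    rw [List.foldl_cons, pvStepA_some q out c (h c (by simp))]
    by_cases hcm : c = ','
    · rw [if_pos hcm, ih _ (fun x hx => h x (by simp [hx]))]
      simp [hcm]
    · rw [if_neg hcm, ih _ (fun x hx => h x (by simp [hx]))]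
      simp [hcm]

-- main invariant: A's fold from the closed-quote state produces exactly out ++ B's scan
theorem pv_main : ∀ (n : ℕ) (l : List Char), l.length ≤ n → ∀ (out : List Char),
    (l.foldl pvStepA (none, out)).2 = out ++ pvGoB l := by
  intro n
  induction n with
  | zero =>
    intro l hl out
    have hnil : l = [] := List.eq_nil_of_length_eq_zero (by omega)
    subst hnil
    rw [pvGoB.eq_def]
    simp
  | succ n ih =>
    intro l hl out
    have hpre : ∀ c ∈ l.takeWhile (fun c => !pvIsQuote c), pvIsQuote c = false := by
      intro c hc
      simpa using List.mem_takeWhile_imp hc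
    have hsplit : l.takeWhile (fun c => !pvIsQuote c) ++ l.dropWhile (fun c => !pvIsQuote c) = l :=
      List.takeWhile_append_dropWhile
    conv_rhs => rw [pvGoB.eq_def]
    split
    · -- no quote in l
      rename_i heq
      conv_lhs => rw [← hsplit, heq]
      rw [List.append_nil, pv_foldA_pre _ _ hpre]
    · -- a quote q found
      rename_i q rest heq
      have hqor : q = '"' ∨ q = '\'' := by
        have := pv_dropWhile_head_false heq
        simp [pvIsQuote] at this; tauto
      have hqcm : (q != ',') = true := by rcases hqor with h | h <;> simp [h]
      have hin : ∀ c ∈ rest.takeWhile (fun c => c != q), c ≠ q := by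
        intro c hc
        simpa using List.mem_takeWhile_imp hc
      have hinsplit : rest.takeWhile (fun c => c != q) ++ rest.dropWhile (fun c => c != q) = rest :=
        List.takeWhile_append_dropWhile
      conv_lhs => rw [← hsplit, heq]
      rw [List.foldl_append, pv_foldA_pre _ _ hpre, List.foldl_cons, pvStepA_open _ _ hqor]
      split
      · -- unterminated quote: inside = rest
        rename_i heq2
        conv_lhs => rw [← hinsplit, heq2]
        rw [List.append_nil, pv_foldA_inside q _ _ hin]
        simp [hqcm]
      · -- matching close quote, then continue after it
        rename_i c0 rest' heq2
        have hc0 : c0 = q := by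
          have := pv_dropWhile_head_false heq2
          simpa using this
        rw [hc0] at heq2
        conv_lhs => rw [← hinsplit, heq2]
        rw [List.foldl_append, pv_foldA_inside q _ _ hin, List.foldl_cons,
            pvStepA_close q _ hqor]
        have hlen : rest'.length ≤ n := by
          have h1 : (l.dropWhile (fun c => !pvIsQuote c)).length ≤ l.length :=
            l.length_dropWhile_le _
          have h2 : (rest.dropWhile (fun c => c != q)).length ≤ rest.length :=
            rest.length_dropWhile_le _
          rw [heq] at h1; rw [heq2] at h2
          simp at h1 h2; omega
        rw [ih rest' hlen]
        simp [List.filter_append, hqcm]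

-- ===== VERDICT (by name: the statement is the Claim_ definition above) =====
theorem remove_comma_inside_quotes_spec : Claim_equal_remove_comma_inside_quotes := by
  intro s _
  unfold Spec_remove_comma_inside_quotes remove_comma_inside_quotes remove_comma_inside_quotes_alt
  have h := pv_main s.toList.length s.toList le_rfl []
  simp at h
  rw [h]
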